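-- pv_equiv track=rewrite | github.com/rlostbet/RPG | RPG/ChatBot/phraseHandling.py | FindStartingPoint
-- ===== SOURCE A (Python) =====
-- def FindStartingPoint(words, phrases):
--     """Find the phrase's starting point in words"""
--     matchingPhrase = None
--
--     # all the words in small cap
--     for i in range(len(words)):
--         words[i] = words[i].lower()
--
--     # split phrases word by word & small cap
--     for i in range(len(phrases)):
--         phrases[i] = [phraseWord.lower() for phraseWord in phrases[i].split()]
--
--     # compare
--     for phrase in phrases:
--         for j, word in enumerate(words):
--
--             if word == phrase[0]:
--                 candidateWords = words[j: j + len(phrase)]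
--
--                 if candidateWords == phrase:
--                     return j
-- ===== SOURCE B (Python) =====
-- def FindStartingPoint(words, phrases):
--     """Find the phrase's starting point in words"""
--     # Lowercase once (without mutating the caller's lists, unlike A).
--     lw = [w.lower() for w in words]
--
--     # One pass: index every lowered word to the list of its positions.
--     index = {}
--     for j, w in enumerate(lw):
--         index.setdefault(w, []).append(j)
--
--     # Per phrase, try only the positions where its first word occurs.
--     for phrase in phrases:
--         pw = [x.lower() for x in phrase.split()]
--         tail = pw[1:]
--         n = len(pw)
--         for j in index.get(pw[0], []):
--             if lw[j + 1 : j + n] == tail: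
--                 return j
-- ===== Notes on version B (the rewrite author's own statement) =====
-- stated objective: alternative
-- what changed: B builds a hash index from each lowered word to its positions once, so each phrase is checked only at the positions of its first word instead of scanning the whole word list; A's in-place lowercasing mutation of words/phrases is dropped (return value unchanged).
-- outside the precondition, e.g. on FindStartingPoint([], ['']): A returns None, B raises IndexError; on FindStartingPoint(['a'], ['a', '']): A returns 0, B returns 0
import Mathlib
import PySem

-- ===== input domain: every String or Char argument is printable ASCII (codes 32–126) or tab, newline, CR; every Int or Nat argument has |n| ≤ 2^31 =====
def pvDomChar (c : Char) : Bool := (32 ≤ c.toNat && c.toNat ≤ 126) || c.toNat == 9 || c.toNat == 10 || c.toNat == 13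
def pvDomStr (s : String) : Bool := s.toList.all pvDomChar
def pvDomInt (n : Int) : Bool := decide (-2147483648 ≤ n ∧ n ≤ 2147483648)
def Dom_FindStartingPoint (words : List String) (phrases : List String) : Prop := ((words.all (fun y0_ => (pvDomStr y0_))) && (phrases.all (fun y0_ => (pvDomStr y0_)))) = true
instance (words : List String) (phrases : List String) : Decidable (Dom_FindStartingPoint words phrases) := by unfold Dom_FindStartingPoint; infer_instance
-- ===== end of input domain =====

-- B replaces A's full scan per phrase by a once-built word→positions index probed at the first
-- phrase word's positions (objective: alternative); A also mutates words/phrases in place (lowercasing),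
-- B does not — the equivalence proved here is about the RETURN value only.


-- ===== PORT A =====
-- inner loop: 'for j, word in enumerate(words): …' (phrase[0] is evaluated inside the loop body,
-- so an empty phrase raises only if the loop runs; pyGet? = none marks that raise)
def aScan (lw : List String) (phrase : List String) : List (Int × String) → Option Int
  | [] => none
  | (j, word) :: rest =>
    match PySem.List.pyGet? phrase 0 with
    | none => none  -- Python raises IndexError here (outside Pre_)
    | some p0 =>
      if word == p0 then
        if PySem.List.slice lw (some j) (some (j + (phrase.length : Int))) == phrase then some j
        else aScan lw phrase rest
      else aScan lw phrase rest

-- outer loop: 'for phrase in phrases: … return j'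
def aLoop (lw : List String) : List (List String) → Option Int
  | [] => none
  | phrase :: rest =>
    match aScan lw phrase (PySem.List.enumerate lw 0) with
    | some j => some j
    | none => aLoop lw rest

def FindStartingPoint (words : List String) (phrases : List String) : Option Int :=
  -- 'words[i] = words[i].lower()' for every i = elementwise map
  let lw := words.map PySem.Str.lower
  -- 'phrases[i] = [w.lower() for w in phrases[i].split()]'
  let ph := phrases.map (fun p => (PySem.Str.split₀ p).map PySem.Str.lower)
  aLoop lw ph

-- ===== PORT B =====
-- 'for j, w in enumerate(lw): index.setdefault(w, []).append(j)'  (= index[w] = index.get(w, []) + [j])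
def bIndex (lw : List String) : PySem.Dict String (List Int) :=
  (PySem.List.enumerate lw 0).foldl (fun d p => d.modify p.2 [] (· ++ [p.1])) PySem.Dict.empty

-- 'for phrase in phrases: pw = …; for j in index.get(pw[0], []): if lw[j+1:j+n] == tail: return j'
def bLoop (lw : List String) (index : PySem.Dict String (List Int)) : List String → Option Int
  | [] => none
  | p :: rest =>
    let pw := (PySem.Str.split₀ p).map PySem.Str.lower
    let tail := PySem.List.slice pw (some 1) none
    match PySem.List.pyGet? pw 0 with
    | none => none  -- Python raises IndexError on pw[0] (outside Pre_)
    | some p0 =>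
      match (index.getD p0 []).find?
          (fun j => PySem.List.slice lw (some (j + 1)) (some (j + (pw.length : Int))) == tail) with
      | some j => some j
      | none => bLoop lw index rest

def FindStartingPoint_alt (words : List String) (phrases : List String) : Option Int :=
  let lw := words.map PySem.Str.lower
  bLoop lw (bIndex lw) phrases

-- ===== PRECONDITION & SPEC =====
-- Pre_ excludes phrase lists containing a phrase with no words (empty / whitespace-only), on which A
-- raises IndexError as soon as its scan reaches that phrase (and B raises on it unconditionally);
-- on inputs where such a phrase is never reached A happens to return (see cites).
def Pre_FindStartingPoint (words : List String) (phrases : List String) : Prop :=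
  ∀ p ∈ phrases, PySem.Str.split₀ p ≠ []
instance (words : List String) (phrases : List String) : Decidable (Pre_FindStartingPoint words phrases) := by unfold Pre_FindStartingPoint; infer_instance

def pvWitness_FindStartingPoint : List String × List String :=
  (["Hello", "there", "World"], ["THERE world", "hello"])

def Spec_FindStartingPoint (words : List String) (phrases : List String) (out : Option Int) : Prop := out = FindStartingPoint_alt words phrases
instance (words : List String) (phrases : List String) (out : Option Int) : Decidable (Spec_FindStartingPoint words phrases out) := by unfold Spec_FindStartingPoint; infer_instance

-- ===== CLAIM (what is proved, stated in full; the proofs are below) =====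
def Claim_equal_FindStartingPoint : Prop := ∀ (words : List String) (phrases : List String), Dom_FindStartingPoint words phrases → Pre_FindStartingPoint words phrases → Spec_FindStartingPoint words phrases (FindStartingPoint words phrases)

-- ===== LEMMAS AND PROOFS =====

-- the index maps w to exactly the positions of w, in order
theorem bIndex_getD (lw : List String) (w : String) :
    (bIndex lw).getD w [] =
      ((PySem.List.enumerate lw 0).filter (fun q => q.2 == w)).map (·.1) := by
  unfold bIndex
  have h := PySem.Dict.getD_foldl_modify_append
      ((PySem.List.enumerate lw 0).map Prod.swap) (PySem.Dict.empty (κ := String) (ν := List Int)) w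
  rw [List.foldl_map] at h
  simp only [Prod.swap, PySem.Dict.getD_empty, List.nil_append,
    List.filter_map, List.map_map] at h
  exact h

-- slice decomposition: full-phrase slice match at k ↔ first word matches and tail slice matches
theorem slice_cons_iff (lw : List String) (p0 : String) (rest : List String) (k : Nat)
    (hk : k < lw.length) :
    (PySem.List.slice lw (some (k : Int)) (some ((k : Int) + ((rest.length + 1 : Nat) : Int)))
        = p0 :: rest)
      ↔ (lw[k] = p0 ∧
         PySem.List.slice lw (some ((k : Int) + 1)) (some ((k : Int) + ((rest.length + 1 : Nat) : Int)))
            = rest) := by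
  have h1 := PySem.List.slice_natCast_add lw k (rest.length + 1)
  have h2 := PySem.List.slice_natCast_add lw (k + 1) rest.length
  push_cast at h1 h2 ⊢
  rw [show (k : Int) + 1 + (rest.length : Int)
      = (k : Int) + ((rest.length : Int) + 1) by ring] at h2
  rw [h1, h2, List.drop_eq_getElem_cons hk, List.take_succ_cons]
  simp [List.cons.injEq]

-- A's inner scan over position/word pairs equals B's find? over the filtered positions
theorem scan_eq (lw : List String) (p0 : String) (rest : List String)
    (l : List (Int × String))
    (hl : ∀ q ∈ l, ∃ (k : Nat) (h : k < lw.length), q = ((k : Int), lw[k])) :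
    aScan lw (p0 :: rest) l =
      ((l.filter (fun q => q.2 == p0)).map (·.1)).find?
        (fun j => PySem.List.slice lw (some (j + 1))
            (some (j + (((p0 :: rest).length : Nat) : Int))) == rest) := by
  induction l with
  | nil => simp [aScan]
  | cons q t ih =>
    obtain ⟨k, hk, hq⟩ := hl q List.mem_cons_self
    have ihh := ih (fun r hr => hl r (List.mem_cons_of_mem _ hr))
    subst hq
    have hget : PySem.List.pyGet? (p0 :: rest) (0 : Int) = some p0 := by
      simp [PySem.List.pyGet?, PySem.List.pyIdx?]
    by_cases hw : lw[k] = p0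
    · by_cases hs : PySem.List.slice lw (some ((k : Int) + 1))
          (some ((k : Int) + ((rest.length + 1 : Nat) : Int))) = rest
      · have hfull := (slice_cons_iff lw p0 rest k hk).mpr ⟨hw, hs⟩
        push_cast at hs hfull
        simp [aScan, hw, hs, hfull]
      · have hfull : PySem.List.slice lw (some (k : Int))
            (some ((k : Int) + ((rest.length + 1 : Nat) : Int))) ≠ p0 :: rest :=
          fun h => hs ((slice_cons_iff lw p0 rest k hk).mp h).2
        push_cast at hs hfull
        simp [aScan, hw, hs, hfull, ihh]
    · simp [aScan, hw, ihh]

theorem loop_eq (lw : List String) (phrases : List String)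
    (hpre : ∀ p ∈ phrases, PySem.Str.split₀ p ≠ []) :
    aLoop lw (phrases.map (fun p => (PySem.Str.split₀ p).map PySem.Str.lower)) =
      bLoop lw (bIndex lw) phrases := by
  induction phrases with
  | nil => simp [aLoop, bLoop]
  | cons p t ih =>
    have hne : (PySem.Str.split₀ p).map PySem.Str.lower ≠ [] := by
      intro h
      exact hpre p List.mem_cons_self (List.map_eq_nil_iff.mp h)
    obtain ⟨p0, rest, hpw⟩ := List.exists_cons_of_ne_nil hne
    have iht := ih (fun q hq => hpre q (List.mem_cons_of_mem _ hq))
    have hget : PySem.List.pyGet? (p0 :: rest) (0 : Int) = some p0 := by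
      simp [PySem.List.pyGet?, PySem.List.pyIdx?]
    have hmem : ∀ q ∈ PySem.List.enumerate lw 0,
        ∃ (k : Nat) (h : k < lw.length), q = ((k : Int), lw[k]) := by
      intro q hq
      rw [PySem.List.mem_enumerate_iff] at hq
      obtain ⟨k, h, rfl⟩ := hq
      exact ⟨k, h, by simp⟩
    simp only [List.map_cons, aLoop, bLoop, hpw]
    rw [scan_eq lw p0 rest _ hmem, hget]
    simp only [bIndex_getD, PySem.List.slice_from_one, List.tail_cons]
    rw [iht]

-- ===== VERDICT (by name: the statement is the Claim_ definition above) =====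
theorem FindStartingPoint_spec : Claim_equal_FindStartingPoint := by
  intro words phrases _ hpre
  unfold Spec_FindStartingPoint FindStartingPoint FindStartingPoint_alt
  exact loop_eq _ _ hpre
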